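-- pv_equiv track=rewrite | github.com/mage-ai/mage-ai | mage_integrations/destinations/snowflake/__init__.py | calculate_records_inserted_and_updated
-- ===== SOURCE A (Python) =====
-- from typing import Callable, Dict, List, Tuple
--
-- def calculate_records_inserted_and_updated(data: List[List[Tuple]]) -> Tuple:
--     records_inserted = 0
--     records_updated = 0
--     number_of_data = len(data)
--
--     for idx, array_of_tuples in enumerate(data):
--         for t in array_of_tuples:
--             if len(t) == 2 and type(t[0]) is int and type(t[1]) is int:
--                 records_inserted += t[0]
--                 records_updated += t[1]
--             elif idx == number_of_data - 1 and len(t) == 1 and type(t[0]) is int: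
--                 records_inserted += t[0]
--
--     return records_inserted, records_updated
-- ===== SOURCE B (Python) =====
-- def calculate_records_inserted_and_updated(data):
--     # One flat pass over all sub-arrays for the (inserted, updated) pairs,
--     # then one pass over just the last sub-array for the singleton counts.
--     records_inserted = sum(
--         t[0]
--         for arr in data
--         for t in arr
--         if len(t) == 2 and type(t[0]) is int and type(t[1]) is int
--     )
--     records_updated = sum(
--         t[1]
--         for arr in data
--         for t in arr
--         if len(t) == 2 and type(t[0]) is int and type(t[1]) is int
--     )
--     if data:
--         records_inserted += sum(
--             t[0] for t in data[-1] if len(t) == 1 and type(t[0]) is int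
--         )
--     return records_inserted, records_updated
-- ===== Notes on version B (the rewrite author's own statement) =====
-- stated objective: simpler
-- what changed: Replaces the enumerate/idx-comparison nested loop by flat comprehension sums over all tuples plus a separate pass over only the last sub-array for singleton tuples.
import Mathlib
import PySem

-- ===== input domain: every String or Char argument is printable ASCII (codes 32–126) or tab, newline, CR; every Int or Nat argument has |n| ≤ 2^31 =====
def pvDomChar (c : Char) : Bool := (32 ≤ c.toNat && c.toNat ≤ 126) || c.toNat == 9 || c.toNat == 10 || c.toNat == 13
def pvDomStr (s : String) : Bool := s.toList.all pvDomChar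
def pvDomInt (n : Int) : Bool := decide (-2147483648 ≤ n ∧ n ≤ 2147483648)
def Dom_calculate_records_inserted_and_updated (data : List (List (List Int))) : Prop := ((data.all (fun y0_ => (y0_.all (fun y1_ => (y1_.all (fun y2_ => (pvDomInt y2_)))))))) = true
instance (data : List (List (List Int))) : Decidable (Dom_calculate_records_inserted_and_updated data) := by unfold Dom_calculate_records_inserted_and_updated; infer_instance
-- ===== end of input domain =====

-- B replaces A's enumerate/idx-comparison nested loop by flat sums over all tuples
-- plus a separate pass over only the last sub-array (objective: simpler).
-- Under the type convention tuple elements are Int, so Python's `type(t[i]) is int`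
-- checks are always true and are dropped in both ports.

-- ===== PORT A =====
def calculate_records_inserted_and_updated (data : List (List (List Int))) : Int × Int :=
  let number_of_data : Int := data.length
  (PySem.List.enumerate data 0).foldl
    (fun (acc : Int × Int) p =>
      p.2.foldl
        (fun (acc : Int × Int) t =>
          if t.length = 2 then (acc.1 + t.getD 0 0, acc.2 + t.getD 1 0)
          else if p.1 = number_of_data - 1 ∧ t.length = 1 then (acc.1 + t.getD 0 0, acc.2)
          else acc)
        acc)
    (0, 0)

-- ===== PORT B =====
def calculate_records_inserted_and_updated_alt (data : List (List (List Int))) : Int × Int :=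
  let records_inserted :=
    ((data.flatMap (fun arr => arr.filter (fun t => t.length = 2))).map (fun t => t.getD 0 0)).sum
  let records_updated :=
    ((data.flatMap (fun arr => arr.filter (fun t => t.length = 2))).map (fun t => t.getD 1 0)).sum
  let records_inserted :=
    match data.getLast? with
    | some last => records_inserted + ((last.filter (fun t => t.length = 1)).map (fun t => t.getD 0 0)).sum
    | none => records_inserted
  (records_inserted, records_updated)

-- ===== PRECONDITION & SPEC =====
def Spec_calculate_records_inserted_and_updated (data : List (List (List Int))) (out : Int × Int) : Prop := out = calculate_records_inserted_and_updated_alt data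
instance (data : List (List (List Int))) (out : Int × Int) : Decidable (Spec_calculate_records_inserted_and_updated data out) := by unfold Spec_calculate_records_inserted_and_updated; infer_instance

-- ===== CLAIM (what is proved, stated in full; the proofs are below) =====
def Claim_equal_calculate_records_inserted_and_updated : Prop := ∀ (data : List (List (List Int))), Dom_calculate_records_inserted_and_updated data → Spec_calculate_records_inserted_and_updated data (calculate_records_inserted_and_updated data)

-- ===== LEMMAS AND PROOFS =====

-- sums of t[0] / t[1] over the length-2 tuples of one sub-array, and of t[0] over its length-1 tuples
def pvP1 (arr : List (List Int)) : Int := ((arr.filter (fun t => t.length = 2)).map (fun t => t.getD 0 0)).sum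
def pvP2 (arr : List (List Int)) : Int := ((arr.filter (fun t => t.length = 2)).map (fun t => t.getD 1 0)).sum
def pvS1 (arr : List (List Int)) : Int := ((arr.filter (fun t => t.length = 1)).map (fun t => t.getD 0 0)).sum

theorem pv_inner_eq (c : Prop) [Decidable c] (arr : List (List Int)) (acc : Int × Int) :
    arr.foldl
      (fun (acc : Int × Int) t =>
        if t.length = 2 then (acc.1 + t.getD 0 0, acc.2 + t.getD 1 0)
        else if c ∧ t.length = 1 then (acc.1 + t.getD 0 0, acc.2)
        else acc) acc
    = (acc.1 + pvP1 arr + (if c then pvS1 arr else 0), acc.2 + pvP2 arr) := by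
  induction arr generalizing acc with
  | nil => simp [pvP1, pvP2, pvS1]
  | cons t rest ih =>
    simp only [List.foldl_cons]
    by_cases hc : c
    · by_cases h2 : t.length = 2
      · rw [if_pos h2, ih]
        simp [pvP1, pvP2, pvS1, h2, hc, Prod.ext_iff]
        constructor <;> ring
      · by_cases h1 : t.length = 1
        · rw [if_neg h2, if_pos ⟨hc, h1⟩, ih]
          simp [pvP1, pvP2, pvS1, h1, hc, Prod.ext_iff]
          ring
        · rw [if_neg h2, if_neg (fun h => h1 h.2), ih]
          simp [pvP1, pvP2, pvS1, h1, h2, hc]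
    · by_cases h2 : t.length = 2
      · rw [if_pos h2, ih]
        simp [pvP1, pvP2, h2, hc, Prod.ext_iff]
        constructor <;> ring
      · rw [if_neg h2, if_neg (fun h => hc h.1), ih]
        simp [pvP1, pvP2, h2, hc]

theorem pv_outer_eq (n : Int) (data : List (List (List Int))) (s : Int) (acc : Int × Int)
    (h : s + data.length = n) :
    (PySem.List.enumerate data s).foldl
      (fun (acc : Int × Int) p =>
        p.2.foldl
          (fun (acc : Int × Int) t =>
            if t.length = 2 then (acc.1 + t.getD 0 0, acc.2 + t.getD 1 0)
            else if p.1 = n - 1 ∧ t.length = 1 then (acc.1 + t.getD 0 0, acc.2)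
            else acc)
          acc) acc
    = (acc.1 + (data.map pvP1).sum +
        (match data.getLast? with | some l => pvS1 l | none => 0),
       acc.2 + (data.map pvP2).sum) := by
  induction data generalizing s acc with
  | nil => simp
  | cons arr rest ih =>
    rw [PySem.List.enumerate_cons, List.foldl_cons, pv_inner_eq (s = n - 1)]
    cases rest with
    | nil =>
      have hs : s = n - 1 := by simp at h; omega
      simp [hs, PySem.List.enumerate_nil]
    | cons b bs =>
      have hs : ¬ (s = n - 1) := by simp at h; omega
      rw [ih (s + 1) _ (by simp at h ⊢; omega)]
      simp [hs]
      constructor <;> ring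

theorem pv_flatMap_sum (h : List Int → Int) (data : List (List (List Int))) (q : List Int → Bool) :
    ((data.flatMap (fun arr => arr.filter q)).map h).sum
    = (data.map (fun arr => ((arr.filter q).map h).sum)).sum := by
  induction data with
  | nil => simp
  | cons a l ih => simp [ih]

-- ===== VERDICT (by name: the statement is the Claim_ definition above) =====
theorem calculate_records_inserted_and_updated_spec : Claim_equal_calculate_records_inserted_and_updated := by
  intro data _
  show _ = _
  unfold calculate_records_inserted_and_updated calculate_records_inserted_and_updated_alt
  rw [pv_outer_eq (data.length : Int) data 0 (0, 0) (by simp)]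
  rw [pv_flatMap_sum, pv_flatMap_sum]
  unfold pvP1 pvP2 pvS1
  cases hl : data.getLast? with
  | none => simp
  | some l => simp
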